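-- pv_equiv track=rewrite | github.com/nikosalonen/deletepy | src/deletepy/operations/domain_ops.py | validate_domain_format
-- ===== SOURCE A (Python) =====
-- def validate_domain_format(domain: str) -> bool:
--     """Validate domain format.
--
--     Args:
--         domain: Domain string to validate
--
--     Returns:
--         bool: True if valid domain format, False otherwise
--     """
--     if not domain or len(domain) > 253:
--         return False
--
--     # Check for valid characters
--     valid_chars = set("abcdefghijklmnopqrstuvwxyz0123456789-.")
--     domain_lower = domain.lower()
--
--     for char in domain_lower:
--         if char not in valid_chars:
--             return False
--
--     # Check for valid structure
--     parts = domain_lower.split(".")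
--     if len(parts) < 2:
--         return False
--
--     # Check each part
--     for part in parts:
--         if not part or len(part) > 63:
--             return False
--         if part.startswith("-") or part.endswith("-"):
--             return False
--
--     return True
-- ===== SOURCE B (Python) =====
-- def validate_domain_format(domain: str) -> bool:
--     """Validate domain format with a single left-to-right scan (no split, no char-set pass)."""
--     if not domain or len(domain) > 253:
--         return False
--
--     labels = 1          # labels seen so far, counting the one in progress
--     cur = 0             # length of the label in progress
--     prev_hyphen = False # last scanned char was '-'
--
--     for ch in domain.lower():
--         if ch == '.':
--             if cur == 0 or prev_hyphen:
--                 return False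
--             labels += 1
--             cur = 0
--             prev_hyphen = False
--         elif ch == '-':
--             if cur == 0:
--                 return False
--             cur += 1
--             if cur > 63:
--                 return False
--             prev_hyphen = True
--         elif ch in "abcdefghijklmnopqrstuvwxyz0123456789":
--             cur += 1
--             if cur > 63:
--                 return False
--             prev_hyphen = False
--         else:
--             return False
--
--     return cur > 0 and not prev_hyphen and labels >= 2
-- ===== Notes on version B (the rewrite author's own statement) =====
-- stated objective: alternative
-- what changed: Replaced A's three passes (char-set membership loop, split on '.', per-part loop) by a single left-to-right state-machine scan tracking current-label length, last-char-was-hyphen and label count.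
import Mathlib
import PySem

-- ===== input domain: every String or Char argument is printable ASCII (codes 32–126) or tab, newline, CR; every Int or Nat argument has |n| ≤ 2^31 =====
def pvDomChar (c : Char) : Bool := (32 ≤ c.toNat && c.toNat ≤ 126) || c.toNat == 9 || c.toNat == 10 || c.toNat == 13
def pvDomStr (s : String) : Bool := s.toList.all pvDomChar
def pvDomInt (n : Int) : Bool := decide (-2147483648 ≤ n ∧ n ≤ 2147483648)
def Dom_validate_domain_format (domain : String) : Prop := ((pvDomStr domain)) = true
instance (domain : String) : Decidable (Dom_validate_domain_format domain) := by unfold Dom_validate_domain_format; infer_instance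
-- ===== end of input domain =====

-- B replaces A's three passes (char-set loop, split on '.', per-part loop) by one
-- left-to-right state-machine scan; objective: alternative single-pass algorithm.

-- ===== PORT A =====
-- set("abcdefghijklmnopqrstuvwxyz0123456789-.")
def pvValidCharsA : List Char :=
  PySem.Set.ofList ['a', 'b', 'c', 'd', 'e', 'f', 'g', 'h', 'i', 'j', 'k', 'l', 'm', 'n',
    'o', 'p', 'q', 'r', 's', 't', 'u', 'v', 'w', 'x', 'y', 'z', '0', '1', '2', '3', '4',
    '5', '6', '7', '8', '9', '-', '.']

def validate_domain_format (domain : String) : Bool :=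
  -- if not domain or len(domain) > 253: return False
  if domain.toList.isEmpty || decide (domain.toList.length > 253) then false
  else
    let domain_lower := PySem.Chars.lower domain.toList
    -- for char in domain_lower: if char not in valid_chars: return False
    if domain_lower.all (fun c => decide (c ∈ pvValidCharsA)) then
      let parts := PySem.Chars.splitOn domain_lower ['.']
      if parts.length < 2 then false
      else
        -- for part in parts: the two early-return checks
        parts.all (fun p =>
          !(p.isEmpty || decide (p.length > 63)) &&
          !(PySem.Chars.startswith p ['-'] || PySem.Chars.endswith p ['-']))
    else false

-- ===== PORT B =====
-- "abcdefghijklmnopqrstuvwxyz0123456789"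
def pvAlnumB : List Char :=
  ['a', 'b', 'c', 'd', 'e', 'f', 'g', 'h', 'i', 'j', 'k', 'l', 'm', 'n', 'o', 'p', 'q',
   'r', 's', 't', 'u', 'v', 'w', 'x', 'y', 'z', '0', '1', '2', '3', '4', '5', '6', '7',
   '8', '9']

-- the for-loop of Source B: state (labels, cur, prev_hyphen), then the line after the loop
def vdfScanB : List Char → Nat → Nat → Bool → Bool
  | [], labels, cur, prev => decide (0 < cur) && !prev && decide (2 ≤ labels)
  | c :: cs, labels, cur, prev =>
    if c = '.' then
      if decide (cur = 0) || prev then false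
      else vdfScanB cs (labels + 1) 0 false
    else if c = '-' then
      if cur = 0 then false
      else if 63 < cur + 1 then false
      else vdfScanB cs labels (cur + 1) true
    else if c ∈ pvAlnumB then
      if 63 < cur + 1 then false
      else vdfScanB cs labels (cur + 1) false
    else false

def validate_domain_format_alt (domain : String) : Bool :=
  if domain.toList.isEmpty || decide (domain.toList.length > 253) then false
  else vdfScanB (PySem.Chars.lower domain.toList) 1 0 false

-- ===== PRECONDITION & SPEC =====
def Spec_validate_domain_format (domain : String) (out : Bool) : Prop := out = validate_domain_format_alt domain
instance (domain : String) (out : Bool) : Decidable (Spec_validate_domain_format domain out) := by unfold Spec_validate_domain_format; infer_instance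

-- ===== CLAIM (what is proved, stated in full; the proofs are below) =====
def Claim_equal_validate_domain_format : Prop := ∀ (domain : String), Dom_validate_domain_format domain → Spec_validate_domain_format domain (validate_domain_format domain)

-- ===== LEMMAS AND PROOFS =====

-- first label of cs (up to the first '.') paired with the list of the remaining labels
def pvSplitDot : List Char → List Char × List (List Char)
  | [] => ([], [])
  | c :: cs =>
    let r := pvSplitDot cs
    if c = '.' then ([], r.1 :: r.2) else (c :: r.1, r.2)

-- A's per-part validity, as a Prop
def GoodP (p : List Char) : Prop :=
  p ≠ [] ∧ p.length ≤ 63 ∧ p.head? ≠ some '-' ∧ p.getLast? ≠ some '-'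

lemma pvSplitDot_nil : pvSplitDot [] = ([], []) := rfl

lemma pvSplitDot_dot (cs : List Char) :
    pvSplitDot ('.' :: cs) = ([], (pvSplitDot cs).1 :: (pvSplitDot cs).2) := by
  simp [pvSplitDot]

lemma pvSplitDot_other (c : Char) (cs : List Char) (h : c ≠ '.') :
    pvSplitDot (c :: cs) = (c :: (pvSplitDot cs).1, (pvSplitDot cs).2) := by
  simp [pvSplitDot, h]

lemma scan_nil (labels cur : Nat) (prev : Bool) :
    vdfScanB [] labels cur prev = (decide (0 < cur) && !prev && decide (2 ≤ labels)) := rfl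

lemma scan_dot (cs : List Char) (labels cur : Nat) (prev : Bool) :
    vdfScanB ('.' :: cs) labels cur prev =
      if decide (cur = 0) || prev then false else vdfScanB cs (labels + 1) 0 false := by
  simp [vdfScanB]

lemma scan_hyph (cs : List Char) (labels cur : Nat) (prev : Bool) :
    vdfScanB ('-' :: cs) labels cur prev =
      if cur = 0 then false
      else if 63 < cur + 1 then false
      else vdfScanB cs labels (cur + 1) true := by
  simp [vdfScanB]

lemma scan_alnum (c : Char) (cs : List Char) (labels cur : Nat) (prev : Bool)
    (h1 : c ≠ '.') (h2 : c ≠ '-') (h3 : c ∈ pvAlnumB) :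
    vdfScanB (c :: cs) labels cur prev =
      if 63 < cur + 1 then false else vdfScanB cs labels (cur + 1) false := by
  simp [vdfScanB, h1, h2, h3]

lemma scan_bad (c : Char) (cs : List Char) (labels cur : Nat) (prev : Bool)
    (h1 : c ≠ '.') (h2 : c ≠ '-') (h3 : c ∉ pvAlnumB) :
    vdfScanB (c :: cs) labels cur prev = false := by
  simp [vdfScanB, h1, h2, h3]

lemma pvSplitDot_go (fuel : Nat) : ∀ (l cur : List Char) (acc : List (List Char)),
    l.length < fuel →
    PySem.Chars.splitOn.go ['.'] fuel l cur acc =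
      acc.reverse ++ (cur.reverse ++ (pvSplitDot l).1) :: (pvSplitDot l).2 := by
  induction fuel with
  | zero => intro l cur acc h; omega
  | succ fuel ih =>
    intro l cur acc h
    cases l with
    | nil => simp [PySem.Chars.splitOn.go, pvSplitDot]
    | cons c cs =>
      by_cases hc : c = '.'
      · subst hc
        have hpre : List.isPrefixOf ['.'] ('.' :: cs) = true := by
          simp [List.isPrefixOf]
        rw [PySem.Chars.splitOn.go]
        simp only [hpre, if_pos]
        rw [show List.drop (['.'] : List Char).length ('.' :: cs) = cs from rfl]
        rw [ih cs [] (cur.reverse :: acc) (by simpa using Nat.lt_of_succ_lt_succ h)]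
        rw [pvSplitDot_dot]
        simp
      · have hpre : List.isPrefixOf ['.'] (c :: cs) = false := by
          simp [List.isPrefixOf]; intro h'; exact absurd h'.symm hc
        rw [PySem.Chars.splitOn.go]
        simp only [hpre, Bool.false_eq_true, if_false]
        rw [ih cs (c :: cur) acc (by simpa using Nat.lt_of_succ_lt_succ h)]
        rw [pvSplitDot_other c cs hc]
        simp

lemma splitOn_eq_pvSplitDot (cs : List Char) :
    PySem.Chars.splitOn cs ['.'] = (pvSplitDot cs).1 :: (pvSplitDot cs).2 := by
  unfold PySem.Chars.splitOn
  rw [pvSplitDot_go (cs.length + 1) cs [] [] (Nat.lt_succ_self _)]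
  simp

set_option maxHeartbeats 1000000 in
lemma validCharsA_eq : pvValidCharsA = pvAlnumB ++ ['-', '.'] := by decide

lemma mem_validCharsA (c : Char) :
    c ∈ pvValidCharsA ↔ (c = '.' ∨ c = '-' ∨ c ∈ pvAlnumB) := by
  rw [validCharsA_eq]
  simp only [List.mem_append, List.mem_cons, List.not_mem_nil, or_false]
  constructor
  · rintro (h | h | h)
    · exact Or.inr (Or.inr h)
    · exact Or.inr (Or.inl h)
    · exact Or.inl h
  · rintro (h | h | h)
    · exact Or.inr (Or.inr h)
    · exact Or.inr (Or.inl h)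
    · exact Or.inl h

lemma prefix_hyphen_iff (p : List Char) :
    PySem.Chars.startswith p ['-'] = true ↔ p.head? = some '-' := by
  cases p with
  | nil => simp [PySem.Chars.startswith, List.isPrefixOf]
  | cons c cs =>
    simp only [PySem.Chars.startswith, List.isPrefixOf, Bool.and_eq_true, beq_iff_eq,
      List.head?_cons, Option.some.injEq, and_true]
    exact ⟨fun h => h.symm, fun h => h.symm⟩

lemma suffix_hyphen_iff (p : List Char) :
    PySem.Chars.endswith p ['-'] = true ↔ p.getLast? = some '-' := by
  simp only [PySem.Chars.endswith, List.isSuffixOf_iff_suffix]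
  constructor
  · rintro ⟨t, rfl⟩; simp
  · intro hl
    rw [List.getLast?_eq_some_iff] at hl
    obtain ⟨l', rfl⟩ := hl
    exact ⟨l', rfl⟩

lemma getLast?_cons_ne {c : Char} {cs : List Char} (h : cs ≠ []) :
    (c :: cs).getLast? = cs.getLast? := by
  rcases cs.eq_nil_or_concat with rfl | ⟨ys, a, rfl⟩
  · exact absurd rfl h
  · rw [show c :: ys.concat a = (c :: ys).concat a from rfl]
    simp only [List.concat_eq_append]
    rw [List.getLast?_concat, List.getLast?_concat]

-- the single-pass scan computes exactly A's structural conditions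
lemma scanB_iff (cs : List Char) : ∀ (labels cur : Nat) (prev : Bool), cur ≤ 63 →
    (vdfScanB cs labels cur prev = true ↔
      ((∀ c ∈ cs, c = '.' ∨ c = '-' ∨ c ∈ pvAlnumB) ∧
       cur + (pvSplitDot cs).1.length ≤ 63 ∧
       (cur = 0 → (pvSplitDot cs).1.head? ≠ some '-') ∧
       0 < cur + (pvSplitDot cs).1.length ∧
       ((pvSplitDot cs).1 = [] → prev = false) ∧
       ((pvSplitDot cs).1 ≠ [] → (pvSplitDot cs).1.getLast? ≠ some '-') ∧
       (∀ r ∈ (pvSplitDot cs).2, GoodP r) ∧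
       2 ≤ labels + (pvSplitDot cs).2.length)) := by
  induction cs with
  | nil =>
    intro labels cur prev hcur
    rw [scan_nil, pvSplitDot_nil]
    simp only [Bool.and_eq_true, Bool.not_eq_true', decide_eq_true_eq]
    constructor
    · rintro ⟨⟨h1, h2⟩, h3⟩
      refine ⟨by simp, by simpa using hcur, by simp, by simpa using h1, fun _ => h2,
        by simp, by simp, by simpa using h3⟩
    · rintro ⟨-, -, -, h4, h5, -, -, h8⟩
      exact ⟨⟨by simpa using h4, h5 trivial⟩, by simpa using h8⟩
  | cons c cs ih =>
    intro labels cur prev hcur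
    by_cases hdot : c = '.'
    · subst hdot
      rw [scan_dot, pvSplitDot_dot]
      by_cases hz : (decide (cur = 0) || prev) = true
      · rw [if_pos hz]
        simp only [Bool.or_eq_true, decide_eq_true_eq] at hz
        simp only [Bool.false_eq_true, false_iff]
        rintro ⟨-, -, -, h4, h5, -, -, -⟩
        rcases hz with hz | hz
        · simp [hz] at h4
        · exact absurd (h5 trivial) (by simp [hz])
      · rw [if_neg (by simpa using hz)]
        simp only [Bool.or_eq_true, decide_eq_true_eq, not_or, Bool.not_eq_true] at hz
        rw [ih (labels + 1) 0 false (by omega)]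
        simp only [List.length_nil, Nat.add_zero, List.head?_nil, ne_eq, List.length_cons,
          List.mem_cons, forall_eq_or_imp]
        constructor
        · rintro ⟨h1, h2, h3, h4, -, h6, h7, h8⟩
          refine ⟨⟨Or.inl trivial, h1⟩, by simpa using hcur, by simp, by omega,
            fun _ => hz.2, by simp, ⟨?_, h7⟩, by omega⟩
          refine ⟨fun hnil => by simp [hnil] at h4, by simpa using h2, h3 trivial,
            fun hl => (h6 (fun hnil => by simp [hnil] at h4)) hl⟩
        · rintro ⟨⟨-, h1⟩, -, -, -, -, -, ⟨hgood, h7⟩, h8⟩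
          obtain ⟨hne, hlen, hhd, hlast⟩ := hgood
          exact ⟨h1, by simpa using hlen, fun _ => hhd,
            by simpa [List.length_pos_iff] using hne, fun _ => trivial,
            fun _ => hlast, h7, by omega⟩
    · by_cases hhy : c = '-'
      · subst hhy
        rw [scan_hyph, pvSplitDot_other '-' cs (by decide)]
        by_cases hz : cur = 0
        · rw [if_pos hz]
          simp only [Bool.false_eq_true, false_iff]
          rintro ⟨-, -, h3, -, -, -, -, -⟩
          exact (h3 hz) (by simp)
        · rw [if_neg hz]
          by_cases hov : 63 < cur + 1
          · rw [if_pos hov]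
            simp only [Bool.false_eq_true, false_iff]
            rintro ⟨-, h2, -, -, -, -, -, -⟩
            simp only [List.length_cons] at h2
            omega
          · rw [if_neg hov]
            rw [ih labels (cur + 1) true (by omega)]
            simp only [List.length_cons, List.mem_cons, forall_eq_or_imp, List.head?_cons,
              ne_eq, reduceCtorEq, not_false_eq_true]
            constructor
            · rintro ⟨h1, h2, -, -, h5, h6, h7, h8⟩
              have hne : (pvSplitDot cs).1 ≠ [] := fun hnil => by simpa using h5 hnil
              refine ⟨⟨Or.inr (Or.inl trivial), h1⟩, by omega, ?_, by omega,
                by simp, fun _ => ?_, h7, h8⟩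
              case _ => simp [hz]
              rw [getLast?_cons_ne hne]
              exact h6 hne
            · rintro ⟨⟨-, h1⟩, h2, -, -, -, h6, h7, h8⟩
              have hl := h6 (by simp)
              have hne : (pvSplitDot cs).1 ≠ [] := by
                intro hnil
                rw [hnil] at hl
                simp at hl
              rw [getLast?_cons_ne hne] at hl
              refine ⟨h1, by omega, ?a3, by omega, ?a5, fun _ => hl, h7, h8⟩
              case a3 => simp
              case a5 => simp [hne]
      · by_cases han : c ∈ pvAlnumB
        · rw [scan_alnum c cs labels cur prev hdot hhy han, pvSplitDot_other c cs hdot]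
          by_cases hov : 63 < cur + 1
          · rw [if_pos hov]
            simp only [Bool.false_eq_true, false_iff]
            rintro ⟨-, h2, -, -, -, -, -, -⟩
            simp only [List.length_cons] at h2
            omega
          · rw [if_neg hov]
            rw [ih labels (cur + 1) false (by omega)]
            simp only [List.length_cons, List.mem_cons, forall_eq_or_imp, List.head?_cons,
              ne_eq, Option.some.injEq]
            constructor
            · rintro ⟨h1, h2, -, -, h5, h6, h7, h8⟩
              refine ⟨⟨Or.inr (Or.inr han), h1⟩, by omega, fun _ => fun hc => hhy hc,
                by omega, by simp, fun _ => ?_, h7, h8⟩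
              by_cases hne : (pvSplitDot cs).1 = []
              · rw [hne]
                simp only [List.getLast?_singleton, Option.some.injEq]
                exact fun hc => hhy hc
              · rw [getLast?_cons_ne hne]
                exact h6 hne
            · rintro ⟨⟨-, h1⟩, h2, -, -, -, h6, h7, h8⟩
              refine ⟨h1, by omega, ?b3, by omega, ?b5, fun hne => ?_, h7, h8⟩
              case b3 => simp
              case b5 => simp
              have hl := h6 (by simp)
              rw [getLast?_cons_ne hne] at hl
              exact hl
        · rw [scan_bad c cs labels cur prev hdot hhy han]
          simp only [Bool.false_eq_true, false_iff]
          rintro ⟨h1, -, -, -, -, -, -, -⟩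
          rcases h1 c (by simp) with h | h | h
          · exact hdot h
          · exact hhy h
          · exact han h

-- A's inner computation (after the guard), as a Prop
lemma Aside_iff (dl : List Char) :
    ((if dl.all (fun c => decide (c ∈ pvValidCharsA)) then
        (if (PySem.Chars.splitOn dl ['.']).length < 2 then false
         else (PySem.Chars.splitOn dl ['.']).all (fun p =>
           !(p.isEmpty || decide (p.length > 63)) &&
           !(PySem.Chars.startswith p ['-'] || PySem.Chars.endswith p ['-'])))
      else false) = true) ↔
      ((∀ c ∈ dl, c ∈ pvValidCharsA) ∧
       2 ≤ 1 + (pvSplitDot dl).2.length ∧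
       GoodP (pvSplitDot dl).1 ∧ (∀ r ∈ (pvSplitDot dl).2, GoodP r)) := by
  rw [splitOn_eq_pvSplitDot]
  by_cases hall : dl.all (fun c => decide (c ∈ pvValidCharsA)) = true
  · rw [if_pos hall]
    simp only [List.all_eq_true, decide_eq_true_eq] at hall
    by_cases hlen : ((pvSplitDot dl).1 :: (pvSplitDot dl).2).length < 2
    · rw [if_pos hlen]
      simp only [List.length_cons] at hlen
      simp only [Bool.false_eq_true, false_iff, not_and]
      intro _ h2
      omega
    · rw [if_neg hlen]
      simp only [List.length_cons] at hlen
      simp only [List.all_eq_true, List.mem_cons, Bool.and_eq_true, Bool.not_eq_true',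
        Bool.or_eq_false_iff, List.isEmpty_eq_false_iff, decide_eq_false_iff_not, not_lt,
        forall_eq_or_imp]
      constructor
      · rintro ⟨⟨⟨hne, hlen1⟩, hpre, hsuf⟩, hrest⟩
        refine ⟨hall, by omega, ⟨hne, hlen1, ?_, ?_⟩, fun r hr => ?_⟩
        · simp only [ne_eq]
          rw [← prefix_hyphen_iff]; simp [hpre]
        · simp only [ne_eq]
          rw [← suffix_hyphen_iff]; simp [hsuf]
        · obtain ⟨⟨hne', hlen'⟩, hpre', hsuf'⟩ := hrest r hr
          exact ⟨hne', hlen',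
            by simp only [ne_eq]; rw [← prefix_hyphen_iff]; simp [hpre'],
            by simp only [ne_eq]; rw [← suffix_hyphen_iff]; simp [hsuf']⟩
      · rintro ⟨-, -, ⟨hne, hlen1, hhd, hlast⟩, hrest⟩
        refine ⟨⟨⟨hne, hlen1⟩, ?_, ?_⟩, fun r hr => ?_⟩
        · rw [← Bool.not_eq_true, prefix_hyphen_iff]; exact hhd
        · rw [← Bool.not_eq_true, suffix_hyphen_iff]; exact hlast
        · obtain ⟨hne', hlen', hhd', hlast'⟩ := hrest r hr
          exact ⟨⟨hne', hlen'⟩, by rw [← Bool.not_eq_true, prefix_hyphen_iff]; exact hhd',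
            by rw [← Bool.not_eq_true, suffix_hyphen_iff]; exact hlast'⟩
  · rw [if_neg hall]
    simp only [Bool.false_eq_true, false_iff, not_and]
    intro h1
    exfalso
    apply hall
    simp only [List.all_eq_true, decide_eq_true_eq]
    exact h1

-- ===== VERDICT (by name: the statement is the Claim_ definition above) =====
theorem validate_domain_format_spec : Claim_equal_validate_domain_format := by
  intro domain _
  unfold Spec_validate_domain_format validate_domain_format validate_domain_format_alt
  by_cases hg : (domain.toList.isEmpty || decide (domain.toList.length > 253)) = true
  · rw [if_pos hg, if_pos hg]
  · rw [if_neg hg, if_neg hg]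
    apply Bool.coe_iff_coe.mp
    rw [Aside_iff (PySem.Chars.lower domain.toList),
      scanB_iff (PySem.Chars.lower domain.toList) 1 0 false (by omega)]
    set p := (pvSplitDot (PySem.Chars.lower domain.toList)).1
    set q := (pvSplitDot (PySem.Chars.lower domain.toList)).2
    constructor
    · rintro ⟨h1, h2, ⟨hne, hlen1, hhd, hlast⟩, hrest⟩
      exact ⟨fun c hc => (mem_validCharsA c).mp (h1 c hc), by simpa using hlen1,
        fun _ => hhd, by simpa [List.length_pos_iff] using hne, fun h => absurd h hne,
        fun _ => hlast, hrest, by omega⟩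
    · rintro ⟨h1, h2, h3, h4, h5, h6, h7, h8⟩
      have hne : p ≠ [] := by
        intro hnil
        rw [hnil] at h4
        simp at h4
      exact ⟨fun c hc => (mem_validCharsA c).mpr (h1 c hc), by omega,
        ⟨hne, by simpa using h2, h3 rfl, h6 hne⟩, h7⟩
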